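-- pv_equiv track=rewrite | github.com/Kowshiks/The-Game-of-Quintris | quintris.py | bump
-- ===== SOURCE A (Python) =====
-- def bump(board):
--
--     height_list = []
--     bump_score = 0
--
--     for col_range in range(0,len(board[0])):
--         x = 0
--         for row_range in range(0,len(board)):
--             if(board[row_range][col_range] == "x"):
--                 x+=1
--                 height_list.append(len(board) - row_range)
--                 break
--         if(x == 0):
--             height_list.append(0)
--
--     for i in range(0,len(height_list)-1):
--         bump_score += abs(height_list[i] - height_list[i+1])
--
--     return bump_score
-- ===== SOURCE B (Python) =====
-- def bump(board):
--     # Level-decomposition: bumpiness = sum over rows (levels) of the number of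
--     # adjacent column pairs whose "has an x at or above this level" flags differ.
--     # No column heights are ever computed.
--     w = len(board[0])
--     seen = [False] * w
--     score = 0
--     for row in board:
--         for c in range(w):
--             if not seen[c] and row[c] == "x":
--                 seen[c] = True
--         score += sum(seen[i] != seen[i + 1] for i in range(w - 1))
--     return score
-- ===== Notes on version B (the rewrite author's own statement) =====
-- stated objective: alternative
-- what changed: B never computes column heights: it decomposes the bumpiness by horizontal levels, keeping a running 'column already hit' boolean profile while sweeping rows top-down and adding, after each row, the number of adjacent columns whose profile bits differ; the sum of these per-level counts equals the sum of adjacent height differences.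
import Mathlib
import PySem

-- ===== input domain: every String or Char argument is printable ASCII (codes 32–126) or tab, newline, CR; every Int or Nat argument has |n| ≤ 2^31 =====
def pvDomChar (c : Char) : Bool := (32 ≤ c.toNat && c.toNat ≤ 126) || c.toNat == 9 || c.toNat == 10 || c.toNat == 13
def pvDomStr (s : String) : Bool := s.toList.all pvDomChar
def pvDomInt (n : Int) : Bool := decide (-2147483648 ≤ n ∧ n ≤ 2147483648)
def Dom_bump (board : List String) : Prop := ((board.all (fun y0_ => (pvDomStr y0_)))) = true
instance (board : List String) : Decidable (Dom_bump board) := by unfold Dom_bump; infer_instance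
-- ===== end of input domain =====

-- B computes the bumpiness by horizontal levels (a running seen-profile, adding adjacent-XOR counts per row) instead of A's column heights; return values proved equal.

-- ===== PORT A =====
-- inner loop 'for row_range in range(0,len(board)): if board[row_range][col_range]=="x": …; break'
-- as structural recursion over the rows, carrying the row index r
def bumpCol : List String → Int → Int → Int → Option Int
  | [], _, _, _ => none
  | s :: rest, r, c, n =>
    if (PySem.Str.pyGet? s c).getD ' ' == 'x' then some (n - r)
    else bumpCol rest (r + 1) c n

def bump (board : List String) : Int :=
  let n : Int := board.length
  let w : Int := PySem.Str.len ((PySem.List.pyGet? board 0).getD "")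
  let hl : List Int := (PySem.List.pyRange 0 w).foldl
    (fun hl c =>
      match bumpCol board 0 c n with
      | some h => hl ++ [h]          -- x found: append height, break
      | none => hl ++ [(0 : Int)])   -- x == 0: append 0
    []
  (PySem.List.pyRange 0 ((hl.length : Int) - 1)).foldl
    (fun acc i => acc + |(PySem.List.pyGet? hl i).getD 0 - (PySem.List.pyGet? hl (i + 1)).getD 0|) 0

-- ===== PORT B =====
def bump_alt (board : List String) : Int :=
  let w : Int := PySem.Str.len ((PySem.List.pyGet? board 0).getD "")
  let st : List Bool × Int := board.foldl
    (fun st row =>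
      let seen := (PySem.List.pyRange 0 w).foldl
        (fun seen c =>
          if !((PySem.List.pyGet? seen c).getD false)
              && ((PySem.Str.pyGet? row c).getD ' ' == 'x')
          then seen.set c.toNat true else seen)
        st.1
      (seen, st.2 + (PySem.List.pyRange 0 (w - 1)).foldl
        (fun acc i => acc + (if ((PySem.List.pyGet? seen i).getD false)
                                != ((PySem.List.pyGet? seen (i + 1)).getD false)
                             then 1 else 0)) 0))
    (List.replicate w.toNat false, 0)
  st.2

-- ===== PRECONDITION & SPEC =====
-- Pre_ is exactly the inputs on which Python A returns (no IndexError): the board is nonempty,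
-- and whenever a row is too short for a column c < len(board[0]), some earlier row already has an
-- 'x' in column c (so the scan for column c stops before reaching the short row).
def Pre_bump (board : List String) : Prop :=
  board ≠ [] ∧
  ∀ c < (board.headD "").toList.length, ∀ r < board.length,
    (board.getD r "").toList.length ≤ c →
      ∃ r' < r, c < (board.getD r' "").toList.length ∧ (board.getD r' "").toList.getD c ' ' = 'x'
instance (board : List String) : Decidable (Pre_bump board) := by unfold Pre_bump; infer_instance
def pvWitness_bump : List String := [".x", "xx"]

def Spec_bump (board : List String) (out : Int) : Prop := out = bump_alt board
instance (board : List String) (out : Int) : Decidable (Spec_bump board out) := by unfold Spec_bump; infer_instance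

-- ===== CLAIM (what is proved, stated in full; the proofs are below) =====
def Claim_equal_bump : Prop := ∀ (board : List String), Dom_bump board → Pre_bump board → Spec_bump board (bump board)

-- ===== LEMMAS AND PROOFS =====

-- the per-cell test both programs make at row s, column c
def pvX (s : String) (c : Int) : Bool := (PySem.Str.pyGet? s c).getD ' ' == 'x'

-- width of the board, as a Nat
def pvW (board : List String) : Nat := ((PySem.List.pyGet? board 0).getD "").toList.length

-- the height of column c that A computes (first 'x' from the top), as a function
def pvH (board : List String) (c : Nat) : Int :=
  match List.findIdx? (fun s => pvX s c) board with
  | some k => (board.length : Int) - k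
  | none => 0

-- per-level adjacent-difference count, the quantity B adds after each row
def pvCnt (W : Nat) (g : Nat → Bool) : Int :=
  ((List.range (W - 1)).map (fun i => if g i != g (i + 1) then (1 : Int) else 0)).sum

-- B's inner (column) loop body, and B's outer (row) loop body with w = ↑W
def pvStepB (row : String) (seen : List Bool) (c : Int) : List Bool :=
  if !((PySem.List.pyGet? seen c).getD false)
      && ((PySem.Str.pyGet? row c).getD ' ' == 'x')
  then seen.set c.toNat true else seen

def pvOuterStep (W : Nat) (st : List Bool × Int) (row : String) : List Bool × Int :=
  let seen := (PySem.List.pyRange 0 (W : Int)).foldl (pvStepB row) st.1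
  (seen, st.2 + (PySem.List.pyRange 0 ((W : Int) - 1)).foldl
      (fun acc i => acc + (if ((PySem.List.pyGet? seen i).getD false)
                              != ((PySem.List.pyGet? seen (i + 1)).getD false)
                           then 1 else 0)) 0)

theorem bumpCol_eq_findIdx? (rows : List String) (r c n : Int) :
    bumpCol rows r c n = (List.findIdx? (fun s => pvX s c) rows).map (fun k => n - (r + (k : Int))) := by
  induction rows generalizing r with
  | nil => rfl
  | cons s rest ih =>
    by_cases h : (PySem.List.pyGet? s.toList c).getD ' ' = 'x'
    · simp [bumpCol, List.findIdx?_cons, pvX, h]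
    · have hp : pvX s c = false := by simp [pvX, h]
      have hb : bumpCol (s :: rest) r c n = bumpCol rest (r + 1) c n := by
        simp [bumpCol, h]
      rw [hb, ih (r + 1), List.findIdx?_cons, hp]
      cases List.findIdx? (fun s => pvX s c) rest
      · simp
      · simp; ring_nf

theorem hl_eq_map (board : List String) (n : Int) (cs : List Int) (acc : List Int) :
    cs.foldl (fun hl c => match bumpCol board 0 c n with
      | some h => hl ++ [h]
      | none => hl ++ [(0 : Int)]) acc
    = acc ++ cs.map (fun c => (bumpCol board 0 c n).getD 0) := by
  induction cs generalizing acc with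
  | nil => simp
  | cons c cs ih =>
    simp only [List.foldl_cons, List.map_cons]
    rw [ih]
    cases bumpCol board 0 c n <;> simp

theorem bumpCol_getD (board : List String) (c : Nat) :
    (bumpCol board 0 (c : Int) (board.length : Int)).getD 0 = pvH board c := by
  rw [bumpCol_eq_findIdx?]
  unfold pvH
  cases h : List.findIdx? (fun s => pvX s (c : Int)) board <;> simp [h]

-- A's value as a sum of adjacent height differences
theorem pyRange_pred (W : Nat) :
    PySem.List.pyRange 0 ((W : Int) - 1) = (List.range (W - 1)).map (fun k : Nat => (k : Int)) := by
  cases W with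
  | zero =>
    have : (PySem.List.pyRange 0 ((0 : Int) - 1)).length = 0 := by
      rw [PySem.List.length_pyRange_one]; rfl
    simp [List.eq_nil_of_length_eq_zero this]
  | succ W =>
    have : ((W + 1 : Nat) : Int) - 1 = ((W : Nat) : Int) := by push_cast; ring
    rw [this, PySem.List.pyRange_zero_natCast]
    simp

theorem sum_map_range_int (n : Nat) (f : Nat → Int) :
    ((List.range n).map f).sum = ∑ i ∈ Finset.range n, f i := rfl

theorem pyGet?_map_pvH (board : List String) (W i : Nat) (hi : i < W) :
    PySem.List.pyGet? (List.map (pvH board) (List.range W)) (i : Int) = some (pvH board i) := by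
  rw [PySem.List.pyGet?_natCast]
  simp [List.getElem?_map, List.getElem?_range hi]

theorem bump_eq_sum (board : List String) :
    bump board = ∑ i ∈ Finset.range (pvW board - 1), |pvH board i - pvH board (i + 1)| := by
  have hW : PySem.Str.len ((PySem.List.pyGet? board 0).getD "") = (pvW board : Int) := by
    rw [PySem.Str.len_eq]; rfl
  simp only [bump, hW]
  rw [hl_eq_map, List.nil_append, PySem.List.pyRange_zero_natCast, List.map_map]
  have hmap : List.map ((fun c => (bumpCol board 0 c (board.length : Int)).getD 0)
        ∘ fun k : Nat => (k : Int)) (List.range (pvW board))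
      = List.map (pvH board) (List.range (pvW board)) := by
    apply List.map_congr_left
    intro c _
    simp only [Function.comp_apply]
    exact bumpCol_getD board c
  rw [hmap]
  have hlen : ((List.map (pvH board) (List.range (pvW board))).length : Int) = (pvW board : Int) := by
    simp
  rw [hlen, pyRange_pred, PySem.List.foldl_add, zero_add, List.map_map]
  rw [← sum_map_range_int]
  congr 1
  apply List.map_congr_left
  intro i hi
  have hi' : i < pvW board - 1 := List.mem_range.mp hi
  simp only [Function.comp_apply]
  rw [pyGet?_map_pvH board _ i (by omega)]
  rw [show ((i : Int) + 1) = ((i + 1 : Nat) : Int) by push_cast; ring]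
  rw [pyGet?_map_pvH board _ (i + 1) (by omega)]
  rfl

theorem foldl_pvStepB_len (row : String) (cs : List Int) (seen : List Bool) :
    (cs.foldl (pvStepB row) seen).length = seen.length := by
  induction cs generalizing seen with
  | nil => rfl
  | cons c cs ih =>
    simp only [List.foldl_cons]
    rw [ih]
    unfold pvStepB
    split <;> simp

theorem foldl_pvStepB_getD (row : String) (cs : List Int) (hcs : ∀ c ∈ cs, 0 ≤ c)
    (seen : List Bool) (j : Nat) (hj : j < seen.length) :
    (cs.foldl (pvStepB row) seen).getD j false
      = (seen.getD j false || (decide ((j : Int) ∈ cs) && pvX row j)) := by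
  induction cs generalizing seen with
  | nil => simp
  | cons c cs ih =>
    have hc0 : 0 ≤ c := hcs c List.mem_cons_self
    have hcs' : ∀ c ∈ cs, 0 ≤ c := fun c hc => hcs c (List.mem_cons_of_mem _ hc)
    simp only [List.foldl_cons]
    by_cases hb : (!((PySem.List.pyGet? seen c).getD false)
        && ((PySem.Str.pyGet? row c).getD ' ' == 'x')) = true
    · have hstep : pvStepB row seen c = seen.set c.toNat true := by
        simp only [pvStepB]; rw [if_pos hb]
      rw [hstep, ih hcs' _ (by simpa using hj)]
      by_cases hjc : (j : Int) = c
      · have hcj : c.toNat = j := by omega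
        have hfj : seen.getD j false = false := by
          simp only [Bool.and_eq_true, Bool.not_eq_true'] at hb
          have h1 := hb.1
          rw [← hjc, PySem.List.pyGet?_natCast] at h1
          simpa [List.getD, List.getElem?_eq_getElem hj] using h1
        have hpx : pvX row j = true := by
          simp only [Bool.and_eq_true] at hb
          have h2 := hb.2
          rw [← hjc] at h2
          simpa [pvX] using h2
        have hset : (seen.set c.toNat true).getD j false = true := by
          rw [hcj]; simp [List.getD, List.getElem?_set_self (by omega), hj]
        rw [hset, hfj, hpx]
        simp [← hjc]
      · have hne : c.toNat ≠ j := by omega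
        have hset : (seen.set c.toNat true).getD j false = seen.getD j false := by
          simp [List.getD, List.getElem?_set_ne hne]
        rw [hset]
        congr 1
        congr 1
        simp [List.mem_cons, hjc]
    · have hstep : pvStepB row seen c = seen := by
        simp only [pvStepB]; rw [if_neg hb]
      rw [hstep, ih hcs' _ hj]
      by_cases hjc : (j : Int) = c
      · have : seen.getD j false = true ∨ pvX row j = false := by
          simp only [Bool.and_eq_true, Bool.not_eq_true', not_and_or] at hb
          rcases hb with hb | hb
          · left
            rw [← hjc, PySem.List.pyGet?_natCast] at hb
            simp only [Bool.not_eq_false] at hb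
            simpa [List.getD, List.getElem?_eq_getElem hj] using hb
          · right
            rw [← hjc] at hb
            simpa [pvX] using hb
        rcases this with hf | hp
        · simp only [List.getD] at hf
          simp [hf]
        · simp [hp]
      · congr 1
        congr 1
        simp [List.mem_cons, hjc]

theorem flag_eq (board : List String) (j : Nat) (t : Nat) (ht : t ≤ board.length) :
    (board.take t).any (fun s => pvX s j) = decide ((board.length : Int) - t < pvH board j) := by
  unfold pvH
  cases h : List.findIdx? (fun s => pvX s (j : Int)) board with
  | none =>
    have hall := List.findIdx?_eq_none_iff.mp h
    have : (board.take t).any (fun s => pvX s j) = false := by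
      simp only [List.any_eq_false]
      intro x hx
      simp [hall x (List.mem_of_mem_take hx)]
    rw [this]
    symm
    simp only [decide_eq_false_iff_not]
    omega
  | some k =>
    obtain ⟨hk, hpk, hmin⟩ := List.findIdx?_eq_some_iff_getElem.mp h
    by_cases hkt : k < t
    · have hmem : board[k] ∈ board.take t := by
        have : (board.take t)[k]'(by simp; omega) = board[k] := List.getElem_take
        rw [← this]
        exact List.getElem_mem _
      have : (board.take t).any (fun s => pvX s j) = true :=
        List.any_eq_true.mpr ⟨board[k], hmem, hpk⟩
      rw [this]
      symm
      simp only [decide_eq_true_iff]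
      omega
    · have : (board.take t).any (fun s => pvX s j) = false := by
        simp only [List.any_eq_false]
        intro x hx
        obtain ⟨m, hm, rfl⟩ := List.mem_iff_getElem.mp hx
        have hmt : m < t := by simp at hm; omega
        have := hmin m (by omega)
        rw [List.getElem_take] at *
        simpa using this
      rw [this]
      symm
      simp only [decide_eq_false_iff_not]
      omega

theorem rowCount_eq (W : Nat) (seen : List Bool) :
    (PySem.List.pyRange 0 ((W : Int) - 1)).foldl
      (fun acc i => acc + (if ((PySem.List.pyGet? seen i).getD false)
                              != ((PySem.List.pyGet? seen (i + 1)).getD false)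
                           then (1 : Int) else 0)) 0
    = pvCnt W (fun j => seen.getD j false) := by
  rw [pyRange_pred, PySem.List.foldl_add]
  unfold pvCnt
  rw [List.map_map, zero_add]
  congr 1
  apply List.map_congr_left
  intro i _
  have h1 : PySem.List.pyGet? seen (i : Int) = seen[i]? := PySem.List.pyGet?_natCast seen i
  have h2 : PySem.List.pyGet? seen ((i : Int) + 1) = seen[i+1]? := by
    rw [show ((i : Int) + 1) = ((i + 1 : Nat) : Int) by push_cast; ring]
    exact PySem.List.pyGet?_natCast seen (i+1)
  simp [Function.comp, h1, h2, List.getD]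

theorem pvCnt_congr (W : Nat) (g g' : Nat → Bool) (h : ∀ j < W, g j = g' j) :
    pvCnt W g = pvCnt W g' := by
  unfold pvCnt
  congr 1
  apply List.map_congr_left
  intro i hi
  have hi' : i < W - 1 := List.mem_range.mp hi
  rw [h i (by omega), h (i + 1) (by omega)]

theorem foldl_pvOuterStep (W : Nat) (rows : List String) (seen0 : List Bool) (score0 : Int)
    (hlen : seen0.length = W) :
    (rows.foldl (pvOuterStep W) (seen0, score0)).2
      = score0 + ((List.range rows.length).map (fun t =>
          pvCnt W (fun j => seen0.getD j false || (rows.take (t + 1)).any (fun s => pvX s j)))).sum := by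
  induction rows generalizing seen0 score0 with
  | nil => simp
  | cons r rest ih =>
    simp only [List.foldl_cons]
    have hstep : pvOuterStep W (seen0, score0) r
        = ((PySem.List.pyRange 0 (W : Int)).foldl (pvStepB r) seen0,
           score0 + pvCnt W (fun j => ((PySem.List.pyRange 0 (W : Int)).foldl (pvStepB r) seen0).getD j false)) := by
      simp only [pvOuterStep]
      rw [rowCount_eq]
    rw [hstep]
    set seen1 := (PySem.List.pyRange 0 (W : Int)).foldl (pvStepB r) seen0 with hseen1
    have hlen1 : seen1.length = W := by rw [hseen1, foldl_pvStepB_len, hlen]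
    have hchar : ∀ j < W, seen1.getD j false = (seen0.getD j false || pvX r j) := by
      intro j hj
      rw [hseen1, foldl_pvStepB_getD r _ (by
          intro c hc
          exact (PySem.List.mem_pyRange_one.mp hc).1) seen0 j (by omega)]
      have : ((j : Int) ∈ PySem.List.pyRange 0 (W : Int)) := by
        rw [PySem.List.mem_pyRange_one]
        constructor
        · exact_mod_cast Nat.zero_le j
        · exact_mod_cast hj
      simp [this]
    rw [ih seen1 _ hlen1]
    rw [List.length_cons, List.range_succ_eq_map, List.map_cons, List.sum_cons, List.map_map]
    have hhead : pvCnt W (fun j => seen1.getD j false)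
        = pvCnt W (fun j => seen0.getD j false || ((r :: rest).take (0 + 1)).any (fun s => pvX s j)) := by
      apply pvCnt_congr
      intro j hj
      rw [hchar j hj]
      simp
    have htail : ∀ t ∈ List.range rest.length,
        pvCnt W (fun j => seen1.getD j false || (rest.take (t + 1)).any (fun s => pvX s j))
        = ((fun t => pvCnt W (fun j => seen0.getD j false || ((r :: rest).take (t + 1)).any (fun s => pvX s j))) ∘ Nat.succ) t := by
      intro t _
      simp only [Function.comp_apply, Nat.succ_eq_add_one]
      apply pvCnt_congr
      intro j hj
      rw [hchar j hj]
      rw [List.take_succ_cons, List.any_cons]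
      ac_rfl
    rw [List.map_congr_left htail, hhead]
    ring

theorem pairSum (n : Nat) (a b : Int) (ha0 : 0 ≤ a) (han : a ≤ n) (hb0 : 0 ≤ b) (hbn : b ≤ n) :
    ∑ k ∈ Finset.range n,
        (if (decide ((k : Int) < a) != decide ((k : Int) < b)) then (1 : Int) else 0) = |a - b| := by
  induction n generalizing a b with
  | zero =>
    have : a = 0 := by omega
    have : b = 0 := by omega
    simp_all
  | succ n ih =>
    rw [Finset.sum_range_succ]
    have hcong : ∑ k ∈ Finset.range n,
        (if (decide ((k : Int) < a) != decide ((k : Int) < b)) then (1 : Int) else 0)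
        = ∑ k ∈ Finset.range n,
        (if (decide ((k : Int) < min a n) != decide ((k : Int) < min b n)) then (1 : Int) else 0) := by
      apply Finset.sum_congr rfl
      intro k hk
      have hk' : k < n := Finset.mem_range.mp hk
      have h1 : decide ((k : Int) < a) = decide ((k : Int) < min a n) := by
        rw [decide_eq_decide]; omega
      have h2 : decide ((k : Int) < b) = decide ((k : Int) < min b n) := by
        rw [decide_eq_decide]; omega
      rw [h1, h2]
    rw [hcong, ih (min a n) (min b n) (by omega) (by omega) (by omega) (by omega)]
    by_cases hA : (n : Int) < a <;> by_cases hB : (n : Int) < b <;>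
      · have : (decide ((n : Int) < a) != decide ((n : Int) < b)) = (decide ((n:Int) < a) != decide ((n:Int) < b)) := rfl
        simp only [hA, hB, decide_true, decide_false, bne_self_eq_false, Bool.bne_false, Bool.false_bne, Bool.bne_true, if_true, if_false, Bool.not_true, Bool.not_false, if_pos, Bool.true_bne]
        rcases abs_cases (a - b) with ⟨e1, f1⟩ | ⟨e1, f1⟩ <;>
          rcases abs_cases (min a (n : Int) - min b (n : Int)) with ⟨e2, f2⟩ | ⟨e2, f2⟩ <;>
            rw [e1, e2] <;> simp only [min_def] at * <;> split_ifs at * <;> omega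

theorem colSum (n : Nat) (a b : Int) (ha0 : 0 ≤ a) (han : a ≤ n) (hb0 : 0 ≤ b) (hbn : b ≤ n) :
    ∑ t ∈ Finset.range n,
        (if (decide ((n : Int) - (t + 1) < a) != decide ((n : Int) - (t + 1) < b))
         then (1 : Int) else 0) = |a - b| := by
  have h : ∀ t ∈ Finset.range n,
      (if (decide ((n : Int) - (t + 1) < a) != decide ((n : Int) - (t + 1) < b))
       then (1 : Int) else 0)
      = (fun k : Nat => if (decide ((k : Int) < a) != decide ((k : Int) < b))
         then (1 : Int) else 0) (n - 1 - t) := by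
    intro t ht
    have ht' : t < n := Finset.mem_range.mp ht
    have : ((n - 1 - t : Nat) : Int) = (n : Int) - (t + 1) := by omega
    simp only [this]
  rw [Finset.sum_congr rfl h]
  beta_reduce
  rw [Finset.sum_range_reflect (fun k : Nat => if (decide ((k : Int) < a) != decide ((k : Int) < b)) then (1 : Int) else 0) n]
  exact pairSum n a b ha0 han hb0 hbn

theorem pvH_bounds (board : List String) (j : Nat) :
    0 ≤ pvH board j ∧ pvH board j ≤ board.length := by
  unfold pvH
  cases h : List.findIdx? (fun s => pvX s (j : Int)) board with
  | none => simp
  | some k =>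
    obtain ⟨hk, -, -⟩ := List.findIdx?_eq_some_iff_getElem.mp h
    constructor <;> simp <;> omega

-- per-pair arithmetic: summing the 0/1 level indicators gives the absolute difference
theorem replicate_getD_false (W j : Nat) : (List.replicate W false).getD j false = false := by
  by_cases h : j < W
  · exact List.getD_replicate false h
  · simp [List.getD, List.getElem?_replicate, h]

theorem bump_eq_alt (board : List String) : bump board = bump_alt board := by
  have hW : PySem.Str.len ((PySem.List.pyGet? board 0).getD "") = (pvW board : Int) := by
    rw [PySem.Str.len_eq]; rfl
  rw [bump_eq_sum]
  simp only [bump_alt, hW, Int.toNat_natCast]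
  have hfun : (fun (st : List Bool × Int) (row : String) =>
      (let seen := (PySem.List.pyRange 0 ((pvW board : Nat) : Int)).foldl
          (fun seen c =>
            if !((PySem.List.pyGet? seen c).getD false)
                && ((PySem.Str.pyGet? row c).getD ' ' == 'x')
            then seen.set c.toNat true else seen) st.1;
       (seen, st.2 + (PySem.List.pyRange 0 (((pvW board : Nat) : Int) - 1)).foldl
          (fun acc i => acc + (if ((PySem.List.pyGet? seen i).getD false)
                                  != ((PySem.List.pyGet? seen (i + 1)).getD false)
                               then 1 else 0)) 0)))
      = pvOuterStep (pvW board) := rfl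
  rw [hfun, foldl_pvOuterStep (pvW board) board _ _ (List.length_replicate), zero_add]
  have hterm : ∀ t ∈ List.range board.length,
      pvCnt (pvW board) (fun j => (List.replicate (pvW board) false).getD j false
          || (board.take (t + 1)).any (fun s => pvX s j))
      = ∑ i ∈ Finset.range (pvW board - 1),
          (if (decide ((board.length : Int) - ((t : Int) + 1) < pvH board i)
               != decide ((board.length : Int) - ((t : Int) + 1) < pvH board (i + 1)))
           then (1 : Int) else 0) := by
    intro t ht
    have ht' : t < board.length := List.mem_range.mp ht
    have hflag : ∀ j, ((List.replicate (pvW board) false).getD j false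
        || (board.take (t + 1)).any (fun s => pvX s j))
        = decide ((board.length : Int) - ((t : Int) + 1) < pvH board j) := by
      intro j
      rw [replicate_getD_false, Bool.false_or, flag_eq board j (t + 1) (by omega)]
      congr 1
    unfold pvCnt
    rw [← sum_map_range_int]
    congr 1
    apply List.map_congr_left
    intro i _
    beta_reduce
    rw [hflag i, hflag (i + 1)]
  rw [List.map_congr_left hterm, sum_map_range_int]
  rw [Finset.sum_comm]
  apply Finset.sum_congr rfl
  intro i _
  exact (colSum board.length (pvH board i) (pvH board (i + 1))
    (pvH_bounds board i).1 (pvH_bounds board i).2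
    (pvH_bounds board (i + 1)).1 (pvH_bounds board (i + 1)).2).symm

-- ===== VERDICT (by name: the statement is the Claim_ definition above) =====
theorem bump_spec : Claim_equal_bump := by
  intro board _ _
  exact bump_eq_alt board
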